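-- pv_equiv track=rewrite | github.com/HECBioSim/hpcbench | hpcbench/logger/util.py | parse_nvidia_smi
-- ===== SOURCE A (Python) =====
-- def parse_nvidia_smi(smi, results):
--     """
--     Parse the output of nvidia-smi and reformat it into a dictionary.
--
--     Args:
--         smi: the string output by nvidia-smi in csv mode
--         results: a dictionary with results from this function. If there is no
--         dictionary yet, pass an empty dictionary.
--
--     Returns:
--         results: a dictionary containing the results, indexed by GPU number.
--     """
--     cols, values = smi.split("\n")[0].split(","), smi.split("\n")[1:]
--     cols = list(map(str.strip, cols))
--     id_col = cols.index("index")
--     if results == {}: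
--         for value in values:
--             value = list(map(str.strip, value.split(",")))
--             results[value[id_col]] = {}
--             for col in cols:
--                 results[value[id_col]][col] = []
--     for row in values:
--         row = list(map(str.strip, row.split(",")))
--         for name, value in zip(cols, row):
--             results[row[id_col]][name].append(value)
--     return results
-- ===== SOURCE B (Python) =====
-- def parse_nvidia_smi(smi, results):
--     """Single-pass variant: fuse the init pass and the append pass into one
--     loop over the rows; a GPU entry is created lazily, only when results
--     started out empty and the GPU has not been seen yet (mutates results
--     in place, like the original)."""
--     lines = smi.split("\n")
--     cols = [c.strip() for c in lines[0].split(",")]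
--     id_col = cols.index("index")
--     was_empty = results == {}
--     for raw in lines[1:]:
--         row = [v.strip() for v in raw.split(",")]
--         gid = row[id_col]
--         if was_empty and gid not in results:
--             results[gid] = {col: [] for col in cols}
--         for name, value in zip(cols, row):
--             results[gid][name].append(value)
--     return results
-- ===== Notes on version B (the rewrite author's own statement) =====
-- stated objective: simpler
-- what changed: A's separate whole-table init pass plus a second append pass over all rows are fused into a single pass that creates a GPU's empty column dict lazily on first sight (only when results started empty) and appends in the same iteration.
import Mathlib
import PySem

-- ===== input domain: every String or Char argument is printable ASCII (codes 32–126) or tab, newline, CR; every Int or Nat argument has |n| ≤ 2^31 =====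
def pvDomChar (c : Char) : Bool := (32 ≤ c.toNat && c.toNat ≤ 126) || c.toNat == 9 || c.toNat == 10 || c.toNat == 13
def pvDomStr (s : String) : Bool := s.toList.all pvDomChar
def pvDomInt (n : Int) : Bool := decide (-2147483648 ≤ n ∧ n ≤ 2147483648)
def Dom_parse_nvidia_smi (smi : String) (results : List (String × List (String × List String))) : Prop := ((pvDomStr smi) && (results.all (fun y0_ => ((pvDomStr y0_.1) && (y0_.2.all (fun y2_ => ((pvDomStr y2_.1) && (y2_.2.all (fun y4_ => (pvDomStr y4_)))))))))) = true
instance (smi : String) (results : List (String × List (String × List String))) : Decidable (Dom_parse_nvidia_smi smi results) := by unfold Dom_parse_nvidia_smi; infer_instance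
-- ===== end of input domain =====

-- B fuses A's init pass and append pass into one lazy-init pass (objective: simpler);
-- both Pythons mutate `results` in place on the way — the equivalence proved here is about the return value.


-- shared dict primitives on the association-list representation (Python dict semantics:
-- overwrite keeps position, new keys append; modify touches the first match, no-op if absent)
def dSet {β : Type} : List (String × β) → String → β → List (String × β)
  | [], k, v => [(k, v)]
  | (a, b) :: t, k, v => if a = k then (k, v) :: t else (a, b) :: dSet t k v

def dMod {β : Type} : List (String × β) → String → (β → β) → List (String × β)
  | [], _, _ => []
  | (a, b) :: t, k, f => if a = k then (a, f b) :: t else (a, b) :: dMod t k f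

def dHasKey {β : Type} (d : List (String × β)) (k : String) : Bool := d.any (fun p => p.1 = k)

-- s.split(sep) for a non-empty literal sep (split? is none only for sep = "")
def pvSplit (s sep : String) : List String := (PySem.Str.split? s sep).getD []

-- row = [v.strip() for v in s.split(",")]
def pvRowOf (s : String) : List String := (pvSplit s ",").map PySem.Str.strip

-- ===== PORT A =====
-- literal transliteration of A: when the "index" column is missing Python raises ValueError
-- (excluded by Pre_); the out-of-range row index (Python IndexError, excluded) is totalised with getD.
def parse_nvidia_smi (smi : String) (results : List (String × List (String × List String))) : List (String × List (String × List String)) :=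
  let lines := pvSplit smi "\n"
  let cols := (pvSplit (lines.headD "") ",").map PySem.Str.strip
  let values := lines.drop 1
  match PySem.List.index? cols "index" with
  | none => results
  | some id_col =>
    let results1 :=
      if results = [] then
        values.foldl (fun acc v =>
          let value := pvRowOf v
          cols.foldl (fun a col => dMod a (value.getD id_col "") (fun inner => dSet inner col []))
            (dSet acc (value.getD id_col "") [])) results
      else results
    values.foldl (fun acc r =>
      let row := pvRowOf r
      (cols.zip row).foldl (fun a nv =>
        dMod a (row.getD id_col "") (fun inner => dMod inner nv.1 (fun l => l ++ [nv.2]))) acc)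
      results1

-- ===== PORT B =====
def parse_nvidia_smi_alt (smi : String) (results : List (String × List (String × List String))) : List (String × List (String × List String)) :=
  let lines := pvSplit smi "\n"
  let cols := (pvSplit (lines.headD "") ",").map PySem.Str.strip
  match PySem.List.index? cols "index" with
  | none => results
  | some id_col =>
    let wasEmpty := results.isEmpty
    (lines.drop 1).foldl (fun acc raw =>
      let row := pvRowOf raw
      let gid := row.getD id_col ""
      let acc1 := if wasEmpty && !dHasKey acc gid
                  then dSet acc gid (cols.foldl (fun d col => dSet d col []) [])
                  else acc
      (cols.zip row).foldl (fun a nv =>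
        dMod a gid (fun inner => dMod inner nv.1 (fun l => l ++ [nv.2]))) acc1)
      results

-- ===== PRECONDITION & SPEC =====
-- Pre_ is exactly A's return domain: the header must contain an "index" column (else ValueError),
-- every data row must be long enough to hold the id column (else IndexError), and when results is
-- non-empty each row's GPU id and each zipped column name must already be keys (else KeyError).
def pvPreB (smi : String) (results : List (String × List (String × List String))) : Bool :=
  let lines := pvSplit smi "\n"
  let cols := (pvSplit (lines.headD "") ",").map PySem.Str.strip
  match PySem.List.index? cols "index" with
  | none => false
  | some id_col =>
    (lines.drop 1).all (fun r =>
      let row := pvRowOf r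
      decide (id_col < row.length) &&
      (results.isEmpty ||
        ((results.lookup (row.getD id_col "")).any (fun inner =>
          ((cols.zip row).map Prod.fst).all (fun c => (inner.lookup c).isSome)))))

def Pre_parse_nvidia_smi (smi : String) (results : List (String × List (String × List String))) : Prop :=
  pvPreB smi results = true
instance (smi : String) (results : List (String × List (String × List String))) : Decidable (Pre_parse_nvidia_smi smi results) := by unfold Pre_parse_nvidia_smi; infer_instance

def pvWitness_parse_nvidia_smi : String × (List (String × List (String × List String))) :=
  ("index, power\n0, 11\n1, 12\n0, 13", [])

def Spec_parse_nvidia_smi (smi : String) (results : List (String × List (String × List String))) (out : List (String × List (String × List String))) : Prop := out = parse_nvidia_smi_alt smi results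
instance (smi : String) (results : List (String × List (String × List String))) (out : List (String × List (String × List String))) : Decidable (Spec_parse_nvidia_smi smi results out) := by unfold Spec_parse_nvidia_smi; infer_instance

-- ===== CLAIM (what is proved, stated in full; the proofs are below) =====
def Claim_equal_parse_nvidia_smi : Prop := ∀ (smi : String) (results : List (String × List (String × List String))), Dom_parse_nvidia_smi smi results → Pre_parse_nvidia_smi smi results → Spec_parse_nvidia_smi smi results (parse_nvidia_smi smi results)

-- ===== LEMMAS AND PROOFS =====

-- proof-side abbreviations for the loop bodies of the two ports
abbrev pvD : Type := List (String × List (String × List String))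
def pvE (cols : List String) : List (String × List String) :=
  cols.foldl (fun d col => dSet d col []) []
def pvGid (id_col : Nat) (r : String) : String := (pvRowOf r).getD id_col ""
-- one append step (the inner loop both Pythons share, per data row)
def pvApp (cols : List String) (id_col : Nat) (acc : pvD) (r : String) : pvD :=
  (cols.zip (pvRowOf r)).foldl
    (fun a nv => dMod a ((pvRowOf r).getD id_col "") (fun inner => dMod inner nv.1 (fun l => l ++ [nv.2]))) acc
-- B's lazy creation step
def pvCInit (cols : List String) (id_col : Nat) (acc : pvD) (r : String) : pvD :=
  if !dHasKey acc (pvGid id_col r) then dSet acc (pvGid id_col r) (pvE cols) else acc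
-- A's (fused) init step
def pvIRow (cols : List String) (id_col : Nat) (acc : pvD) (r : String) : pvD :=
  dSet acc (pvGid id_col r) (pvE cols)

theorem dSet_cons {β : Type} (a : String) (b : β) (t : List (String × β)) (k : String) (v : β) :
    dSet ((a, b) :: t) k v = if a = k then (k, v) :: t else (a, b) :: dSet t k v := rfl

theorem dMod_cons {β : Type} (a : String) (b : β) (t : List (String × β)) (k : String) (f : β → β) :
    dMod ((a, b) :: t) k f = if a = k then (a, f b) :: t else (a, b) :: dMod t k f := rfl

theorem keys_dMod {β : Type} (d : List (String × β)) (k : String) (f : β → β) :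
    (dMod d k f).map Prod.fst = d.map Prod.fst := by
  induction d with
  | nil => rfl
  | cons p t ih =>
      obtain ⟨a, b⟩ := p
      rw [dMod_cons]
      by_cases h : a = k <;> simp [h, ih]

theorem dHasKey_eq_mem {β : Type} (d : List (String × β)) (k : String) :
    dHasKey d k = decide (k ∈ d.map Prod.fst) := by
  induction d with
  | nil => rfl
  | cons p t ih =>
      simp only [dHasKey, List.any_cons, List.map_cons, List.mem_cons]
      simp only [dHasKey] at ih
      rw [ih]
      by_cases h : p.1 = k <;> by_cases h2 : k ∈ t.map Prod.fst <;> simp [h, h2]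
      exact fun hh => h hh.symm

theorem dHasKey_dMod {β : Type} (d : List (String × β)) (k k' : String) (f : β → β) :
    dHasKey (dMod d k f) k' = dHasKey d k' := by
  rw [dHasKey_eq_mem, dHasKey_eq_mem, keys_dMod]

theorem dHasKey_dSet {β : Type} (d : List (String × β)) (k k' : String) (v : β) :
    dHasKey (dSet d k v) k' = (dHasKey d k' || decide (k' = k)) := by
  induction d with
  | nil => by_cases h : k' = k <;> simp [dSet, dHasKey, h, eq_comm]
  | cons p t ih =>
      obtain ⟨a, b⟩ := p
      rw [dSet_cons]
      by_cases h : a = k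
      · rw [if_pos h]
        simp only [dHasKey, List.any_cons] at *
        by_cases h2 : k' = k <;> simp [h2, h, eq_comm]
      · rw [if_neg h]
        simp only [dHasKey, List.any_cons] at *
        rw [ih]
        by_cases h2 : k' = a <;> by_cases h3 : k' = k <;> simp [h2, h3, eq_comm]

theorem dMod_dSet_self {β : Type} (d : List (String × β)) (k : String) (v : β) (f : β → β) :
    dMod (dSet d k v) k f = dSet d k (f v) := by
  induction d with
  | nil => simp [dSet, dMod]
  | cons p t ih =>
      obtain ⟨a, b⟩ := p
      rw [dSet_cons]
      by_cases h : a = k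
      · rw [if_pos h, dMod_cons, if_pos rfl, dSet_cons, if_pos h]
      · rw [if_neg h, dMod_cons, if_neg h, dSet_cons, if_neg h, ih]

theorem mem_dSet {β : Type} (d : List (String × β)) (k : String) (v : β) (p : String × β)
    (hp : p ∈ dSet d k v) : p ∈ d ∨ p = (k, v) := by
  induction d with
  | nil => simpa [dSet] using hp
  | cons q t ih =>
      obtain ⟨a, b⟩ := q
      rw [dSet_cons] at hp
      by_cases h : a = k
      · rw [if_pos h] at hp
        rcases (by simpa using hp) with h1 | h1
        · right; simp [h1]
        · left; simp [h1]
      · rw [if_neg h] at hp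
        rcases (by simpa using hp) with h1 | h1
        · left; simp [h1]
        · rcases ih h1 with h2 | h2
          · left; simp [h2]
          · right; exact h2

theorem dSet_eq_self {β : Type} (d : List (String × β)) (k : String) (v : β)
    (hall : ∀ p ∈ d, p.2 = v) (hk : dHasKey d k = true) : dSet d k v = d := by
  induction d with
  | nil => simp [dHasKey] at hk
  | cons p t ih =>
      obtain ⟨a, b⟩ := p
      rw [dSet_cons]
      by_cases h : a = k
      · rw [if_pos h]
        have hb : b = v := hall (a, b) (by simp)
        simp [h, hb]
      · rw [if_neg h]
        have hk' : dHasKey t k = true := by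
          simpa [dHasKey, List.any_cons, h] using hk
        rw [ih (fun p hp => hall p (by simp [hp])) hk']

theorem dSet_append {β : Type} (d : List (String × β)) (k : String) (v : β)
    (h : dHasKey d k = false) : dSet d k v = d ++ [(k, v)] := by
  induction d with
  | nil => rfl
  | cons p t ih =>
      obtain ⟨a, b⟩ := p
      have h1 : ¬ a = k := by
        intro hak; simp [dHasKey, List.any_cons, hak] at h
      have h2 : dHasKey t k = false := by
        simpa [dHasKey, List.any_cons, h1] using h
      rw [dSet_cons, if_neg h1, ih h2]; rfl

theorem dMod_append {β : Type} (d t : List (String × β)) (k : String) (f : β → β)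
    (h : dHasKey d k = true) : dMod (d ++ t) k f = dMod d k f ++ t := by
  induction d with
  | nil => simp [dHasKey] at h
  | cons p tl ih =>
      obtain ⟨a, b⟩ := p
      by_cases hak : a = k
      · rw [List.cons_append, dMod_cons, if_pos hak, dMod_cons, if_pos hak]; rfl
      · have h2 : dHasKey tl k = true := by
          simpa [dHasKey, List.any_cons, hak] using h
        rw [List.cons_append, dMod_cons, if_neg hak, dMod_cons, if_neg hak, ih h2]; rfl

-- a fold of dMod's at one fixed existing key ignores an appended tail
theorem foldl_dMod_append {β γ : Type} (l : List γ) (d t : List (String × β)) (k : String)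
    (g : γ → β → β) (h : dHasKey d k = true) :
    l.foldl (fun a nv => dMod a k (g nv)) (d ++ t) =
      l.foldl (fun a nv => dMod a k (g nv)) d ++ t := by
  induction l generalizing d with
  | nil => rfl
  | cons nv l ih =>
      simp only [List.foldl_cons]
      rw [dMod_append d t k (g nv) h]
      exact ih _ (by rw [dHasKey_dMod]; exact h)

theorem keys_foldl_dMod {β γ : Type} (l : List γ) (d : List (String × β)) (k : String)
    (g : γ → β → β) (k' : String) :
    dHasKey (l.foldl (fun a nv => dMod a k (g nv)) d) k' = dHasKey d k' := by
  induction l generalizing d with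
  | nil => rfl
  | cons nv l ih =>
      simp only [List.foldl_cons]
      rw [ih, dHasKey_dMod]

theorem dHasKey_pvApp (cols : List String) (id_col : Nat) (X : pvD) (r : String) (k : String) :
    dHasKey (pvApp cols id_col X r) k = dHasKey X k := by
  unfold pvApp; exact keys_foldl_dMod _ _ _ _ _

theorem pvApp_append (cols : List String) (id_col : Nat) (X t : pvD) (r : String)
    (h : dHasKey X (pvGid id_col r) = true) :
    pvApp cols id_col (X ++ t) r = pvApp cols id_col X r ++ t := by
  unfold pvApp; exact foldl_dMod_append _ _ _ _ _ h

-- A's literal per-row init loop equals one dSet of the fresh column dict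
theorem init_fuse (cols : List String) (gid : String) (acc : pvD) (x : List (String × List String)) :
    cols.foldl (fun a col => dMod a gid (fun inner => dSet inner col [])) (dSet acc gid x) =
      dSet acc gid (cols.foldl (fun d col => dSet d col []) x) := by
  induction cols generalizing x with
  | nil => rfl
  | cons c cols ih => simp only [List.foldl_cons, dMod_dSet_self]; exact ih _

theorem dHasKey_pvCInit_self (cols : List String) (id_col : Nat) (acc : pvD) (r : String) :
    dHasKey (pvCInit cols id_col acc r) (pvGid id_col r) = true := by
  unfold pvCInit
  by_cases h : dHasKey acc (pvGid id_col r) <;> simp [h, dHasKey_dSet]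

theorem dHasKey_pvCInit_mono (cols : List String) (id_col : Nat) (acc : pvD) (r : String)
    (k : String) (h : dHasKey acc k = true) : dHasKey (pvCInit cols id_col acc r) k = true := by
  unfold pvCInit
  by_cases h2 : dHasKey acc (pvGid id_col r) <;> simp [h2, dHasKey_dSet, h]

-- the creation of a LATER row's entry commutes past this row's appends, once this row's entry exists
theorem cInit_app_comm (cols : List String) (id_col : Nat) (X : pvD) (r r' : String)
    (h : dHasKey X (pvGid id_col r) = true) :
    pvCInit cols id_col (pvApp cols id_col X r) r' = pvApp cols id_col (pvCInit cols id_col X r') r := by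
  by_cases h2 : dHasKey X (pvGid id_col r')
  · unfold pvCInit
    simp [dHasKey_pvApp, h2]
  · have h3 : dHasKey (pvApp cols id_col X r) (pvGid id_col r') = false := by
      rw [dHasKey_pvApp]; simpa using h2
    unfold pvCInit
    rw [h3]
    simp only [Bool.not_false, if_true]
    rw [dSet_append _ _ _ h3, (by simpa using h2 : dHasKey X (pvGid id_col r') = false)]
    simp only [Bool.not_false, if_true]
    rw [dSet_append _ _ _ (by simpa using h2), pvApp_append cols id_col X _ r h]

theorem foldl_cInit_app (cols : List String) (id_col : Nat) (vs : List String) (Y : pvD) (r : String)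
    (h : dHasKey Y (pvGid id_col r) = true) :
    vs.foldl (pvCInit cols id_col) (pvApp cols id_col Y r) =
      pvApp cols id_col (vs.foldl (pvCInit cols id_col) Y) r := by
  induction vs generalizing Y with
  | nil => rfl
  | cons r'' vs ih =>
      simp only [List.foldl_cons]
      rw [cInit_app_comm cols id_col Y r r'' h]
      exact ih _ (dHasKey_pvCInit_mono _ _ _ _ _ h)

-- loop fusion: B's single pass = conditional-init pass, then append pass
theorem fuse_main (cols : List String) (id_col : Nat) (vs : List String) (acc : pvD) :
    vs.foldl (fun a r => pvApp cols id_col (pvCInit cols id_col a r) r) acc =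
      vs.foldl (pvApp cols id_col) (vs.foldl (pvCInit cols id_col) acc) := by
  induction vs generalizing acc with
  | nil => rfl
  | cons r vs ih =>
      simp only [List.foldl_cons]
      rw [ih, foldl_cInit_app cols id_col vs _ r (dHasKey_pvCInit_self cols id_col acc r)]

-- over a state whose stored values are all the fresh column dict, A's unconditional
-- (re-)init and B's conditional init run to the same state
theorem init_passes_eq (cols : List String) (id_col : Nat) (vs : List String) (d : pvD)
    (hall : ∀ p ∈ d, p.2 = pvE cols) :
    vs.foldl (pvIRow cols id_col) d = vs.foldl (pvCInit cols id_col) d := by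
  induction vs generalizing d with
  | nil => rfl
  | cons r vs ih =>
      have hstep : pvIRow cols id_col d r = pvCInit cols id_col d r := by
        unfold pvIRow pvCInit
        by_cases h : dHasKey d (pvGid id_col r)
        · simp [h, dSet_eq_self d _ _ hall h]
        · simp [h]
      have hall' : ∀ p ∈ pvIRow cols id_col d r, p.2 = pvE cols := by
        intro p hp
        rcases mem_dSet _ _ _ _ (by simpa [pvIRow] using hp) with h | h
        · exact hall p h
        · simp [h]
      simp only [List.foldl_cons]
      rw [← hstep, ih _ hall']

-- ===== VERDICT (by name: the statement is the Claim_ definition above) =====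
theorem parse_nvidia_smi_spec : Claim_equal_parse_nvidia_smi := by
  intro smi results _hD _hP
  unfold Spec_parse_nvidia_smi
  simp only [parse_nvidia_smi, parse_nvidia_smi_alt]
  rcases hidx : PySem.List.index? ((pvSplit ((pvSplit smi "\n").headD "") ",").map PySem.Str.strip) "index" with _ | id_col
  · rfl
  · dsimp only
    set cols := (pvSplit ((pvSplit smi "\n").headD "") ",").map PySem.Str.strip with hcols
    set vs := (pvSplit smi "\n").drop 1 with hvs
    by_cases hres : results = []
    · subst hres
      simp only [List.isEmpty_nil, Bool.true_and, reduceIte]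
      have hA1 : (fun (acc : pvD) v =>
          cols.foldl (fun a col => dMod a ((pvRowOf v).getD id_col "") (fun inner => dSet inner col []))
            (dSet acc ((pvRowOf v).getD id_col "") [])) = pvIRow cols id_col := by
        funext acc v
        exact init_fuse cols _ acc []
      have hB1 : (fun (acc : pvD) raw =>
          (cols.zip (pvRowOf raw)).foldl
            (fun a nv => dMod a ((pvRowOf raw).getD id_col "") (fun inner => dMod inner nv.1 (fun l => l ++ [nv.2])))
            (if !dHasKey acc ((pvRowOf raw).getD id_col "")
             then dSet acc ((pvRowOf raw).getD id_col "") (cols.foldl (fun d col => dSet d col []) [])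
             else acc)) = (fun a r => pvApp cols id_col (pvCInit cols id_col a r) r) := by
        funext a r
        rfl
      rw [hA1, hB1, fuse_main, init_passes_eq cols id_col vs [] (by intro p hp; simp at hp)]
      rfl
    · rw [if_neg hres]
      have hresb : results.isEmpty = false := by
        cases results <;> simp_all
      simp only [hresb, Bool.false_and]
      rfl
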